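-- pv_equiv track=rewrite | github.com/mmswflow-upb/Bioinformatics | Project_L6/L6/ex2.py | digest
-- ===== SOURCE A (Python) =====
-- from typing import List, Dict
--
-- def digest(seq: str, site: str) -> List[int]:
--     """Return fragment sizes after EcoRI digest (cut between G^AATTC, after the G)."""
--     cuts = []
--     i = seq.find(site)
--     while i != -1:
--         cuts.append(i + 1)  # cut after 'G'
--         i = seq.find(site, i + 1)
--     positions = [0] + sorted(cuts) + [len(seq)]
--     return [positions[i+1] - positions[i] for i in range(len(positions)-1)]
-- ===== SOURCE B (Python) =====
-- def digest(seq: str, site: str):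
--     """Return fragment sizes after EcoRI digest (cut between G^AATTC, after the G)."""
--     n = len(seq)
--     frags = []
--     prev = 0
--     for i in range(n + 1):
--         if seq.startswith(site, i):
--             frags.append(i + 1 - prev)
--             prev = i + 1
--     frags.append(n - prev)
--     return frags
-- ===== Notes on version B (the rewrite author's own statement) =====
-- stated objective: alternative
-- what changed: Replaces the find-loop that collects cut positions, sorts them, pads with 0/len and takes pairwise differences by a single index scan that tests a substring match at every position and emits each fragment size directly from a running prev cursor, with no positions list and no sort.
import Mathlib
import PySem

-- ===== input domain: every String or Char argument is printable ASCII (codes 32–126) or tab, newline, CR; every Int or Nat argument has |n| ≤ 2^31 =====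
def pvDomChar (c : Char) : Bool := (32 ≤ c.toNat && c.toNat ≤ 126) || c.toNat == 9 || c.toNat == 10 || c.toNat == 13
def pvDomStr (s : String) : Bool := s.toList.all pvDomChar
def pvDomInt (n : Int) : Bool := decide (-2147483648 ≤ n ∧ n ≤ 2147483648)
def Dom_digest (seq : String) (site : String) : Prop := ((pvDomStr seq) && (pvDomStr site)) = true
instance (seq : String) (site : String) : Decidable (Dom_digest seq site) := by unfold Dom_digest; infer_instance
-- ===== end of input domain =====

-- B replaces A's collect-positions/sort/pairwise-difference pipeline by one index scan
-- that tests a substring match at each position and emits fragment sizes directly ('alternative').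

-- ===== PORT A =====

-- termination facts for the while-loop of A (cited by pvCutsA's decreasing_by)
theorem pvFindFrom_gt_len (s t : List Char) (start : Nat) (h : s.length < start) :
    PySem.Chars.findFrom s t (start : Int) none = -1 := by
  simp only [PySem.Chars.findFrom]
  have h0 : ¬ ((start : Int) < 0) := by omega
  rw [if_neg h0, if_pos (by exact_mod_cast h)]

theorem pvFindFrom_lt (s t : List Char) (start : Nat)
    (h : ¬ PySem.Chars.findFrom s t (start : Int) none = -1) :
    start ≤ (PySem.Chars.findFrom s t (start : Int) none).toNat := by
  by_cases hle : start ≤ s.length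
  · have := (PySem.Chars.findFrom_natCast_spec s t start hle h).1
    omega
  · exact absurd (pvFindFrom_gt_len s t start (by omega)) h

-- the while-loop: i = seq.find(site, start); while i != -1: cuts.append(i+1); i = seq.find(site, i+1)
def pvCutsA (s t : List Char) (start : Nat) : List Int :=
  let i := PySem.Chars.findFrom s t (start : Int) none
  if h : i = -1 then []
  else (i + 1) :: pvCutsA s t (i.toNat + 1)
termination_by s.length + 1 - start
decreasing_by
  have h1 := pvFindFrom_lt s t start h
  have h2 : ¬ s.length < start := fun hc => h (pvFindFrom_gt_len s t start hc)
  omega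

def digest (seq : String) (site : String) : List Int :=
  let s := seq.toList
  let t := site.toList
  let cuts := pvCutsA s t 0          -- the loop, starting from i = seq.find(site)
  let positions : List Int := 0 :: PySem.List.sorted cuts id ++ [(s.length : Int)]
  (PySem.List.pyRange 0 ((positions.length : Int) - 1)).map
    (fun i => PySem.List.pyGetD positions (i + 1) 0 - PySem.List.pyGetD positions i 0)

-- ===== PORT B =====
def digest_alt (seq : String) (site : String) : List Int :=
  let s := seq.toList
  let t := site.toList
  let n := s.length
  let r := (List.range (n + 1)).foldl
    (fun (st : List Int × Int) (i : Nat) =>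
      -- seq.startswith(site, i): exact for the indices 0 ≤ i ≤ len(seq) this loop uses
      if PySem.Chars.startswith (List.drop i s) t then
        (st.1 ++ [(i : Int) + 1 - st.2], (i : Int) + 1)
      else st)
    ([], 0)
  r.1 ++ [(n : Int) - r.2]

-- ===== PRECONDITION & SPEC =====
def Spec_digest (seq : String) (site : String) (out : List Int) : Prop := out = digest_alt seq site
instance (seq : String) (site : String) (out : List Int) : Decidable (Spec_digest seq site out) := by unfold Spec_digest; infer_instance

-- ===== CLAIM (what is proved, stated in full; the proofs are below) =====
def Claim_equal_digest : Prop := ∀ (seq : String) (site : String), Dom_digest seq site → Spec_digest seq site (digest seq site)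

-- ===== LEMMAS AND PROOFS =====

-- successive differences p→c1→c2→… and the last element of p, c1, c2, …
def pvDiffChain : Int → List Int → List Int
  | _, [] => []
  | p, c :: cs => (c - p) :: pvDiffChain c cs

def pvLastOf : Int → List Int → Int
  | p, [] => p
  | _, c :: cs => pvLastOf c cs

theorem pvDiffChain_append (p : Int) (cs : List Int) (x : Int) :
    pvDiffChain p (cs ++ [x]) = pvDiffChain p cs ++ [x - pvLastOf p cs] := by
  induction cs generalizing p with
  | nil => rfl
  | cons c cs ih => simp [pvDiffChain, pvLastOf, ih]

-- adjacent differences of a nonempty list, Nat-indexed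
theorem pvAdjacent (p : Int) (rest : List Int) :
    (List.range rest.length).map
      (fun k : Nat => (p :: rest).getD (k + 1) 0 - (p :: rest).getD k 0)
    = pvDiffChain p rest := by
  induction rest generalizing p with
  | nil => rfl
  | cons c cs ih =>
    rw [List.length_cons, List.range_succ_eq_map, List.map_cons, List.map_map]
    show (c - p) :: _ = (c - p) :: pvDiffChain c cs
    congr 1
    have hfun : ((fun k : Nat => (p :: c :: cs).getD (k + 1) 0 - (p :: c :: cs).getD k 0)
          ∘ Nat.succ)
        = (fun k : Nat => (c :: cs).getD (k + 1) 0 - (c :: cs).getD k 0) :=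
      funext fun k => rfl
    rw [hfun, ih c]

-- A's comprehension over adjacent pairs of a nonempty positions list is pvDiffChain
theorem pvComp_eq_diffChain (p : Int) (rest : List Int) :
    (PySem.List.pyRange 0 (((p :: rest).length : Int) - 1)).map
      (fun i => PySem.List.pyGetD (p :: rest) (i + 1) 0 - PySem.List.pyGetD (p :: rest) i 0)
    = pvDiffChain p rest := by
  have hlen : ((p :: rest).length : Int) - 1 = ((rest.length : Nat) : Int) := by
    simp
  rw [hlen, PySem.List.pyRange_zero_natCast, List.map_map, ← pvAdjacent p rest]
  refine List.map_congr_left (fun k _ => ?_)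
  simp only [Function.comp]
  have e2 : ((k : Int) + 1) = ((k + 1 : Nat) : Int) := by push_cast; ring
  rw [e2, PySem.List.pyGetD_natCast, PySem.List.pyGetD_natCast]

-- B's fold, characterized by the matched positions (in order)
theorem pvFoldB (s t : List Char) (L : List Nat) (acc : List Int) (p : Int) :
    L.foldl
      (fun (st : List Int × Int) (i : Nat) =>
        if PySem.Chars.startswith (List.drop i s) t then
          (st.1 ++ [(i : Int) + 1 - st.2], (i : Int) + 1)
        else st)
      (acc, p)
    = (acc ++ pvDiffChain p ((L.filter
          (fun i : Nat => PySem.Chars.startswith (List.drop i s) t)).map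
          (fun i : Nat => ((i : Int) + 1))),
       pvLastOf p ((L.filter
          (fun i : Nat => PySem.Chars.startswith (List.drop i s) t)).map
          (fun i : Nat => ((i : Int) + 1)))) := by
  induction L generalizing acc p with
  | nil => simp [pvDiffChain, pvLastOf]
  | cons x xs ih =>
    by_cases hx : PySem.Chars.startswith (List.drop x s) t = true
    · simp [List.foldl_cons, hx, ih, pvDiffChain, pvLastOf]
    · simp only [Bool.not_eq_true] at hx
      simp [List.foldl_cons, hx, ih]

-- minimal-match split of a filtered strictly increasing list (used for A's find loop)
theorem pvFilter_split (l : List Nat) (P : Nat → Bool) (a j : Nat)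
    (h1 : a ≤ j) (h2 : P j = true) (h3 : ∀ i, a ≤ i → i < j → P i = false)
    (h4 : j ∈ l) (hs : l.Pairwise (· < ·)) :
    l.filter (fun i => decide (a ≤ i) && P i)
      = j :: l.filter (fun i => decide (j + 1 ≤ i) && P i) := by
  induction l with
  | nil => cases h4
  | cons x xs ih =>
    have hpw := (List.pairwise_cons.mp hs).1
    have hs' := (List.pairwise_cons.mp hs).2
    rw [List.filter_cons, List.filter_cons]
    by_cases hxj : x = j
    · subst hxj
      have hc1 : (decide (a ≤ x) && P x) = true := by simp [h1, h2]
      have hc2 : (decide (x + 1 ≤ x) && P x) = false := by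
        have : ¬ (x + 1 ≤ x) := by omega
        simp [this]
      rw [if_pos hc1, if_neg (by rw [hc2]; exact Bool.false_ne_true)]
      congr 1
      exact List.filter_congr (fun y hy => by
        have hxy := hpw y hy
        simp [show a ≤ y by omega, show x + 1 ≤ y by omega])
    · have hjxs : j ∈ xs := by
        rcases h4 with _ | h4
        · exact absurd rfl hxj
        · assumption
      have hxlt : x < j := hpw j hjxs
      have hc1 : (decide (a ≤ x) && P x) = false := by
        by_cases hax : a ≤ x
        · simp [hax, h3 x hax hxlt]
        · simp [hax]
      have hc2 : (decide (j + 1 ≤ x) && P x) = false := by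
        have : ¬ (j + 1 ≤ x) := by omega
        simp [this]
      rw [if_neg (by rw [hc1]; exact Bool.false_ne_true),
        if_neg (by rw [hc2]; exact Bool.false_ne_true)]
      exact ih hjxs hs'

-- characterization of A's while-loop
theorem pvCutsA_eq (s t : List Char) (start : Nat) :
    pvCutsA s t start
      = ((List.range (s.length + 1)).filter
          (fun i : Nat => decide (start ≤ i) && decide (t <+: s.drop i))).map
          (fun i : Nat => ((i : Int) + 1)) := by
  rw [pvCutsA]
  by_cases h : PySem.Chars.findFrom s t (start : Int) none = -1
  · rw [dif_pos h]
    by_cases hle : start ≤ s.length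
    · have hni := (PySem.Chars.findFrom_natCast_eq_neg_one_iff s t start hle).mp h
      have hall : ∀ i ∈ List.range (s.length + 1),
          ¬ ((decide (start ≤ i) && decide (t <+: s.drop i)) = true) := by
        intro i _ hc
        simp only [Bool.and_eq_true, decide_eq_true_eq] at hc
        obtain ⟨hsi, hp⟩ := hc
        apply hni
        have hdd : s.drop i = (s.drop start).drop (i - start) := by
          rw [List.drop_drop]; congr 1; omega
        rw [hdd] at hp
        exact hp.isInfix.trans (List.drop_suffix _ _).isInfix
      rw [List.filter_eq_nil_iff.mpr hall]
      rfl
    · have hall : ∀ i ∈ List.range (s.length + 1),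
          ¬ ((decide (start ≤ i) && decide (t <+: s.drop i)) = true) := by
        intro i hi hc
        have := List.mem_range.mp hi
        simp only [Bool.and_eq_true, decide_eq_true_eq] at hc
        omega
      rw [List.filter_eq_nil_iff.mpr hall]
      rfl
  · rw [dif_neg h]
    have hle : start ≤ s.length := by
      by_contra hc
      exact h (pvFindFrom_gt_len s t start (by omega))
    have hrw := PySem.Chars.findFrom_natCast s t start hle
    by_cases hf : PySem.Chars.find (s.drop start) t = -1
    · exact absurd (by rw [hrw, if_pos hf]) h
    have hjdef : PySem.Chars.findFrom s t (start : Int) none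
        = (start : Int) + PySem.Chars.find (s.drop start) t := by
      rw [hrw, if_neg hf]
    have hfnn : 0 ≤ PySem.Chars.find (s.drop start) t :=
      (PySem.Chars.find_nonneg_iff _ _).mpr ((PySem.Chars.find_ne_neg_one_iff _ _).mp hf)
    have hflen : PySem.Chars.find (s.drop start) t ≤ ((s.drop start).length : Int) :=
      PySem.Chars.find_le_length _ _
    rw [List.length_drop] at hflen
    obtain ⟨_, hpref, hmin⟩ := PySem.Chars.findFrom_natCast_spec s t start hle h
    set j := PySem.Chars.findFrom s t (start : Int) none with hj
    have hj0 : 0 ≤ j := by rw [hjdef]; omega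
    have hkj : start ≤ j.toNat := by rw [hjdef]; omega
    have hjn : j.toNat ≤ s.length := by rw [hjdef]; omega
    have hsplit := pvFilter_split (List.range (s.length + 1))
      (fun i : Nat => decide (t <+: s.drop i)) start j.toNat
      hkj (by simpa using hpref)
      (fun i hai hij => by simpa using hmin i hai hij)
      (List.mem_range.mpr (by omega)) List.pairwise_lt_range
    rw [hsplit, List.map_cons]
    congr 1
    · rw [Int.toNat_of_nonneg hj0]
    · exact pvCutsA_eq s t (j.toNat + 1)
termination_by s.length + 1 - start
decreasing_by
  have h1 := pvFindFrom_lt s t start h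
  have _h2 : ¬ s.length < start := fun hc => h (pvFindFrom_gt_len s t start hc)
  omega

-- the cut list is strictly increasing, so A's sort is the identity
theorem pvCuts_pairwise (s t : List Char) :
    (((List.range (s.length + 1)).filter
        (fun i : Nat => decide (0 ≤ i) && decide (t <+: s.drop i))).map
        (fun i : Nat => ((i : Int) + 1))).Pairwise (fun a b => id a < id b) := by
  refine List.Pairwise.map _ (fun a b hab => ?_)
    (List.Pairwise.sublist List.filter_sublist List.pairwise_lt_range)
  simp only [id]
  omega

-- ===== VERDICT (by name: the statement is the Claim_ definition above) =====
theorem digest_spec : Claim_equal_digest := by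
  intro seq site _
  show digest seq site = digest_alt seq site
  unfold digest digest_alt
  simp only
  rw [pvCutsA_eq seq.toList site.toList 0,
    PySem.List.sorted_eq_of_perm_of_pairwise_lt _ _ id (List.Perm.refl _)
      (pvCuts_pairwise seq.toList site.toList)]
  simp only [List.cons_append]
  rw [pvComp_eq_diffChain 0
      (((List.range (seq.toList.length + 1)).filter
          (fun i : Nat => decide (0 ≤ i) && decide (site.toList <+: seq.toList.drop i))).map
          (fun i : Nat => ((i : Int) + 1)) ++ [(seq.toList.length : Int)]),
    pvDiffChain_append,
    pvFoldB seq.toList site.toList (List.range (seq.toList.length + 1)) [] 0]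
  have hfilter : (List.range (seq.toList.length + 1)).filter
      (fun i : Nat => PySem.Chars.startswith (seq.toList.drop i) site.toList)
      = (List.range (seq.toList.length + 1)).filter
        (fun i : Nat => decide (0 ≤ i) && decide (site.toList <+: seq.toList.drop i)) :=
    List.filter_congr (fun i _ => by
      have h := PySem.Chars.startswith_iff (seq.toList.drop i) site.toList
      by_cases hp : site.toList <+: seq.toList.drop i
      · simp [h.mpr hp, hp]
      · have hf : PySem.Chars.startswith (seq.toList.drop i) site.toList = false := by
          rw [Bool.eq_false_iff]
          exact fun hc => hp (h.mp hc)
        simp [hf, hp])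
  rw [hfilter]
  simp
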